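-- pv_equiv track=rewrite | github.com/fredjeong/coding-test-prep | 프로그래머스/2/172927. 광물 캐기/광물 캐기.py | solution
-- ===== SOURCE A (Python) =====
-- def solution(picks, minerals):
--     # 광물은 다섯개씩 쪼개서 보자
--     arr = []
--     stack = []
--     for i in range(len(minerals)):
--         stack.append(minerals[i])
--         if i % 5 == 4 or i == len(minerals)-1:
--             arr.append(stack)
--             stack = []
--
--     # 이 중에서 주어진 곡괭이로 캘 수 있는 것만 보자
--     if sum(picks) < len(arr):
--         for i in range(len(arr)-sum(picks)):
--             arr.pop()
--
--     def dfs(picks, arr, pick, tiredness):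
--         # 캐야 하는 광물이 더 이상 없거나 곡괭이를 다 썼다면 리턴
--         if picks[pick] == 0:
--             return
--
--         # 캐야하는 광물 묶음
--         given_arr = arr[0]
--
--         # 곡괭이 횟수 차감
--         new_picks = picks[:]
--         new_picks[pick] -= 1
--
--         # 피로도 계산
--         if pick == 0:
--             for mineral in given_arr:
--                 tiredness += 1
--         elif pick == 1:
--             for mineral in given_arr:
--                 if mineral == 'diamond':
--                     tiredness += 5
--                 else:
--                     tiredness += 1
--         elif pick == 2:
--             for mineral in given_arr:
--                 if mineral == 'diamond':
--                     tiredness += 25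
--                 elif mineral == 'iron':
--                     tiredness += 5
--                 elif mineral == 'stone':
--                     tiredness += 1
--
--         if len(arr) == 1:
--             answer.add(tiredness)
--             return
--         else:
--             temp = arr[1:]
--             dfs(new_picks, temp, 0, tiredness)
--             dfs(new_picks, temp, 1, tiredness)
--             dfs(new_picks, temp, 2, tiredness)
--
--     answer = set()
--     dfs(picks, arr, 0, 0)
--     dfs(picks, arr, 1, 0)
--     dfs(picks, arr, 2, 0)
--     return min(answer)
-- ===== SOURCE B (Python) =====
-- from functools import lru_cache
--
-- def solution(picks, minerals):
--     # chunk minerals into groups of five, keep only as many groups as there are picks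
--     groups = [minerals[i:i+5] for i in range(0, len(minerals), 5)]
--     total = sum(picks)
--     if total < len(groups):
--         groups = groups[:total]
--     # per-group fatigue for each pick kind
--     costs = [(len(g),
--               sum(5 if m == 'diamond' else 1 for m in g),
--               sum(25 if m == 'diamond' else 5 if m == 'iron' else 1 if m == 'stone' else 0 for m in g))
--              for g in groups]
--
--     @lru_cache(maxsize=None)
--     def best(i, a, b, c):
--         # minimum fatigue to mine groups[i:] with a/b/c picks of each kind left
--         if i == len(costs):
--             return 0
--         cands = []
--         if a > 0:
--             cands.append(costs[i][0] + best(i + 1, a - 1, b, c))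
--         if b > 0:
--             cands.append(costs[i][1] + best(i + 1, a, b - 1, c))
--         if c > 0:
--             cands.append(costs[i][2] + best(i + 1, a, b, c - 1))
--         return min(cands)
--
--     return best(0, picks[0], picks[1], picks[2])
-- ===== Notes on version B (the rewrite author's own statement) =====
-- stated objective: alternative
-- what changed: A enumerates all 3^g assignments of pick kinds to mineral groups by DFS, accumulating every total fatigue in a global set and taking min; B slices the groups directly, precomputes a per-group cost triple and computes the minimum by a memoized recursion (dynamic programming) over (group index, remaining picks).
-- outside the precondition, e.g. on solution([-1, 2, 0], ['diamond']): A returns 1, B returns 5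
import Mathlib
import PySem

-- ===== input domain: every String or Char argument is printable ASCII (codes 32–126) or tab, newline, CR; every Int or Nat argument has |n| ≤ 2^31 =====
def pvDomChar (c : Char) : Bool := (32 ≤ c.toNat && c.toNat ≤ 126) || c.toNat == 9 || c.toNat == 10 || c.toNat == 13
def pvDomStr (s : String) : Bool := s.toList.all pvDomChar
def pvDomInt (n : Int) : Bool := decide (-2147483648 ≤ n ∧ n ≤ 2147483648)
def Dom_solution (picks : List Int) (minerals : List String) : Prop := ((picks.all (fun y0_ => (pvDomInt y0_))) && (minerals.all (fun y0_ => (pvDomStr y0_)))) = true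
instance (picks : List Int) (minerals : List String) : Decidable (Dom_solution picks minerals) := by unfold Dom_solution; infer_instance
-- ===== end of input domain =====

-- B replaces A's exhaustive DFS over all pick assignments (which grows a global answer set
-- and takes its min) by a memoized recursion over (group index, remaining picks) on
-- precomputed per-group cost triples; return values agree on Pre_.

-- ===== PORT A =====
-- dfs: Python's inner closure; the global 'answer' set is threaded as the last argument.
-- arr = [] is unreachable under Pre_ (Python would raise IndexError on arr[0]); we return ans there.
def dfsA (picks : List Int) (arr : List (List String)) (pick : Int) (t : Int)
    (ans : PySem.Set Int) : PySem.Set Int :=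
  match arr with
  | [] => ans
  | givenArr :: rest =>
    if PySem.List.pyGetD picks pick 0 == 0 then ans
    else
      let newPicks := PySem.List.pySetD picks pick (PySem.List.pyGetD picks pick 0 - 1)
      let t :=
        if pick == 0 then givenArr.foldl (fun acc _ => acc + 1) t
        else if pick == 1 then
          givenArr.foldl (fun acc m => if m == "diamond" then acc + 5 else acc + 1) t
        else if pick == 2 then
          givenArr.foldl (fun acc m =>
            if m == "diamond" then acc + 25
            else if m == "iron" then acc + 5
            else if m == "stone" then acc + 1 else acc) t
        else t
      if rest == [] then PySem.Set.add ans t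
      else
        let a0 := dfsA newPicks rest 0 t ans
        let a1 := dfsA newPicks rest 1 t a0
        dfsA newPicks rest 2 t a1

def solution (picks : List Int) (minerals : List String) : Int :=
  let n : Int := (minerals.length : Int)
  let p := (PySem.List.pyRange 0 n).foldl
    (fun (st : List (List String) × List String) i =>
      let stack := st.2 ++ [PySem.List.pyGetD minerals i ""]
      if PySem.Int.mod i 5 == 4 || i == n - 1 then (st.1 ++ [stack], ([] : List String))
      else (st.1, stack))
    ([], [])
  let arr := p.1
  let s := picks.sum
  let arr := if s < (arr.length : Int) then
      -- 'for i in range(len(arr)-sum(picks)): arr.pop()'; pop of [] raises IndexError (outside Pre_)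
      (PySem.List.pyRange 0 ((arr.length : Int) - s)).foldl
        (fun a _ => ((PySem.List.pop? a).map Prod.snd).getD a) arr
    else arr
  let ans := dfsA picks arr 2 0 (dfsA picks arr 1 0 (dfsA picks arr 0 0 PySem.Set.empty))
  -- min(answer): ValueError on an empty set, excluded by Pre_
  (PySem.List.min? ans (fun x => x)).getD 0

-- ===== PORT B =====
-- per-group fatigue for the three pick kinds (the 'costs' list comprehension of Source B)
def costTriple (g : List String) : Int × Int × Int :=
  ((g.length : Int),
   (g.map (fun m => if m == "diamond" then (5 : Int) else 1)).sum,
   (g.map (fun m => if m == "diamond" then (25 : Int)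
                    else if m == "iron" then (5 : Int)
                    else if m == "stone" then (1 : Int) else 0)).sum)

-- best(i, a, b, c) of Source B, structurally on the costs suffix; lru_cache only caches the
-- same values, so the recursion is ported plainly.  min([]) raises (unreachable under Pre_).
def bestB : List (Int × Int × Int) → Int → Int → Int → Int
  | [], _, _, _ => 0
  | t :: rest, a, b, c =>
      let cands :=
        (if a > 0 then [t.1 + bestB rest (a - 1) b c] else []) ++
        (if b > 0 then [t.2.1 + bestB rest a (b - 1) c] else []) ++
        (if c > 0 then [t.2.2 + bestB rest a b (c - 1)] else [])
      (PySem.List.min? cands (fun x => x)).getD 0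

def solution_alt (picks : List Int) (minerals : List String) : Int :=
  let groups := (PySem.List.pyRange 0 (minerals.length : Int) 5).map
      (fun i => PySem.List.slice minerals (some i) (some (i + 5)))
  let total := picks.sum
  let groups := if total < (groups.length : Int) then PySem.List.slice groups none (some total)
                else groups
  let costs := groups.map costTriple
  bestB costs (PySem.List.pyGetD picks 0 0) (PySem.List.pyGetD picks 1 0)
    (PySem.List.pyGetD picks 2 0)

-- ===== PRECONDITION & SPEC =====
-- Pre_ is the problem's natural domain: at least the three pick counts (only the first three
-- are ever used as picks; extra entries merely enter the trimming sum, which B mirrors), first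
-- three nonnegative, at least one mineral, a positive total, and enough usable picks for the
-- kept groups (min(#groups, total) ≤ p0+p1+p2).  Outside it A raises (IndexError on
-- picks[2]/arr[0]/arr.pop(), ValueError on min(empty set)) — except for pick lists whose first
-- three counts include a negative one, inputs outside the intended domain (counts), on which
-- A's '!= 0' availability test treats that count as unlimited.
def Pre_solution (picks : List Int) (minerals : List String) : Prop :=
  3 ≤ picks.length ∧ (∀ p ∈ picks.take 3, 0 ≤ p) ∧ minerals ≠ [] ∧ 0 < picks.sum ∧
    min (((minerals.length + 4) / 5 : Nat) : Int) picks.sum ≤ (picks.take 3).sum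
instance (picks : List Int) (minerals : List String) : Decidable (Pre_solution picks minerals) := by
  unfold Pre_solution; infer_instance

def pvWitness_solution : List Int × List String :=
  ([1, 1, 1], ["diamond", "iron", "stone", "stone", "iron", "diamond"])

def Spec_solution (picks : List Int) (minerals : List String) (out : Int) : Prop :=
  out = solution_alt picks minerals
instance (picks : List Int) (minerals : List String) (out : Int) :
    Decidable (Spec_solution picks minerals out) := by unfold Spec_solution; infer_instance

-- ===== CLAIM (what is proved, stated in full; the proofs are below) =====
def Claim_equal_solution : Prop := ∀ (picks : List Int) (minerals : List String),
  Dom_solution picks minerals → Pre_solution picks minerals →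
  Spec_solution picks minerals (solution picks minerals)

-- ===== LEMMAS AND PROOFS =====

-- chunks of five, the common shape of both groupings
def chunk5 (xs : List String) : List (List String) :=
  if h : xs = [] then [] else xs.take 5 :: chunk5 (xs.drop 5)
termination_by xs.length
decreasing_by
  have : xs.length ≠ 0 := fun hn => h (List.eq_nil_of_length_eq_zero hn)
  simp
  omega

lemma chunk5_nil : chunk5 [] = [] := by rw [chunk5]; simp

lemma chunk5_cons (xs : List String) (h : xs ≠ []) :
    chunk5 xs = xs.take 5 :: chunk5 (xs.drop 5) := by
  rw [chunk5]; simp [h]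

lemma chunk5_ne_nil (xs : List String) (h : xs ≠ []) : chunk5 xs ≠ [] := by
  rw [chunk5_cons xs h]; simp

-- A's grouping loop produces chunk5
lemma loopA_spec (xs : List String) (ys : List String) (s : Nat)
    (A : List (List String)) (st : List String)
    (hlen : xs.length = s + ys.length) (hys : ys = xs.drop s)
    (hst : st.length = s % 5) (hnil : ys = [] → st = []) :
    (((PySem.List.pyRange (s : Int) (xs.length : Int)).foldl
      (fun (st : List (List String) × List String) i =>
        let stack := st.2 ++ [PySem.List.pyGetD xs i ""]
        if PySem.Int.mod i 5 == 4 || i == (xs.length : Int) - 1 then (st.1 ++ [stack], ([] : List String))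
        else (st.1, stack))
      (A, st)).1) = A ++ chunk5 (st ++ ys) := by
  induction ys generalizing s A st with
  | nil =>
    simp only [List.length_nil, Nat.add_zero] at hlen
    rw [hnil rfl, hlen, PySem.List.pyRange_one_eq_nil le_rfl]
    simp [chunk5_nil]
  | cons y ys' ih =>
    have hslt : s < xs.length := by simp at hlen; omega
    have hmod : PySem.Int.mod (s : Int) 5 = ((s % 5 : Nat) : Int) := by
      exact_mod_cast PySem.Int.mod_natCast s 5
    have h0 : xs[s]? = some y := by
      have h0 : (xs.drop s)[0]? = some y := by rw [← hys]; rfl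
      rw [List.getElem?_drop] at h0
      simpa using h0
    have hget : PySem.List.pyGetD xs (s : Int) "" = y := by
      rw [PySem.List.pyGetD_natCast]
      simp [List.getD, h0]
    have hdrop : ys' = xs.drop (s + 1) := by
      have h1 : xs.drop (s + 1) = (xs.drop s).drop 1 := by rw [List.drop_drop]
      rw [h1, ← hys]; rfl
    have hcast : ((s : Int) + 1) = ((s + 1 : Nat) : Int) := by push_cast; ring
    rw [PySem.List.pyRange_one_cons (by exact_mod_cast hslt), List.foldl_cons]
    dsimp only
    rw [hget]
    by_cases h4 : s % 5 = 4
    · have hc : (PySem.Int.mod (s : Int) 5 == 4 || ((s : Int) == (xs.length : Int) - 1)) = true := by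
        rw [hmod, h4]; simp
      rw [hc, if_pos rfl]
      by_cases hlast : ys' = []
      · subst hlast
        simp only [List.length_cons, List.length_nil] at hlen
        have hs1 : (xs.length : Int) = (s : Int) + 1 := by omega
        rw [hs1, PySem.List.pyRange_one_eq_nil le_rfl, List.foldl_nil]
        have hl5 : (st ++ [y]).length = 5 := by
          simp only [List.length_append, List.length_cons, List.length_nil]; omega
        show A ++ [st ++ [y]] = A ++ chunk5 (st ++ [y])
        rw [chunk5_cons (st ++ [y]) (by simp), List.take_of_length_le (by omega),
          List.drop_eq_nil_of_le (by omega), chunk5_nil]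
      · rw [hcast, ih (s + 1) (A ++ [st ++ [y]]) []
          (by simp at hlen ⊢; omega) hdrop (by simp; omega) (fun _ => rfl)]
        have hl5 : (st ++ [y]).length = 5 := by
          simp only [List.length_append, List.length_cons, List.length_nil]; omega
        have hsplit : st ++ y :: ys' = (st ++ [y]) ++ ys' := by simp
        rw [hsplit, chunk5_cons ((st ++ [y]) ++ ys') (by simp),
          List.take_left' hl5, List.drop_left' hl5]
        simp [chunk5_nil]
    · by_cases hlast : ys' = []
      · subst hlast
        simp only [List.length_cons, List.length_nil] at hlen
        have hc : (PySem.Int.mod (s : Int) 5 == 4 || ((s : Int) == (xs.length : Int) - 1)) = true := by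
          rw [hmod]
          have he : ((s : Int)) = (xs.length : Int) - 1 := by omega
          simp [he]
        rw [hc, if_pos rfl]
        have hs1 : (xs.length : Int) = (s : Int) + 1 := by omega
        rw [hs1, PySem.List.pyRange_one_eq_nil le_rfl, List.foldl_nil]
        have hlt5 : (st ++ [y]).length ≤ 5 := by
          simp only [List.length_append, List.length_cons, List.length_nil]; omega
        show A ++ [st ++ [y]] = A ++ chunk5 (st ++ [y])
        rw [chunk5_cons (st ++ [y]) (by simp), List.take_of_length_le (by omega),
          List.drop_eq_nil_of_le (by omega), chunk5_nil]
      · have hyslt : s + 1 < xs.length := by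
          have := List.length_pos_iff.mpr hlast
          simp at hlen; omega
        have hc : (PySem.Int.mod (s : Int) 5 == 4 || ((s : Int) == (xs.length : Int) - 1)) = false := by
          rw [hmod]
          simp only [Bool.or_eq_false_iff, beq_eq_false_iff_ne, ne_eq]
          refine ⟨?_, ?_⟩ <;> omega
        rw [hc, if_neg (by simp)]
        rw [hcast, ih (s + 1) A (st ++ [y])
          (by simp at hlen ⊢; omega) hdrop
          (by simp only [List.length_append, List.length_cons, List.length_nil]; omega)
          (fun h => absurd h hlast)]
        have hsplit : (st ++ [y]) ++ ys' = st ++ y :: ys' := by simp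
        rw [hsplit]

lemma chunkIdx (N : Nat) : ∀ xs : List String, xs.length ≤ N →
    (List.range ((xs.length + 4) / 5)).map (fun k => (xs.drop (5 * k)).take 5) = chunk5 xs := by
  induction N with
  | zero =>
    intro xs h
    have : xs = [] := List.eq_nil_of_length_eq_zero (by omega)
    subst this
    simp [chunk5_nil]
  | succ N ih =>
    intro xs h
    by_cases hx : xs = []
    · subst hx; simp [chunk5_nil]
    · have hn : 0 < xs.length := List.length_pos_iff.mpr hx
      rw [chunk5_cons xs hx, ← ih (xs.drop 5) (by simp; omega)]
      have hM : (xs.length + 4) / 5 = ((xs.drop 5).length + 4) / 5 + 1 := by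
        rw [List.length_drop]; omega
      rw [hM, List.range_succ_eq_map, List.map_cons, List.map_map]
      congr 1
      apply List.map_congr_left
      intro k _
      simp only [Function.comp]
      rw [List.drop_drop]
      congr 2
      omega

-- B's grouping comprehension produces chunk5
lemma groupsB_spec (xs : List String) :
    (PySem.List.pyRange 0 (xs.length : Int) 5).map
      (fun i => PySem.List.slice xs (some i) (some (i + 5))) = chunk5 xs := by
  rw [PySem.List.pyRange_of_pos 0 (xs.length : Int) (by omega), List.map_map]
  have hM : (if (0 : Int) < (xs.length : Int) then (((xs.length : Int) - 0 + 5 - 1) / 5).toNat else 0)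
      = (xs.length + 4) / 5 := by
    split
    · rw [show ((xs.length : Int) - 0 + 5 - 1) = ((xs.length + 4 : Nat) : Int) by push_cast; ring,
        show (5 : Int) = ((5 : Nat) : Int) from rfl, ← Int.natCast_div, Int.toNat_natCast]
    · omega
  rw [hM, ← chunkIdx xs.length xs le_rfl]
  apply List.map_congr_left
  intro k _
  simp only [Function.comp]
  rw [show ((0 : Int) + 5 * (k : Int)) = ((5 * k : Nat) : Int) by push_cast; ring,
    PySem.List.slice_toNat xs (by positivity) (by positivity), Int.toNat_natCast,
    show (((5 * k : Nat) : Int) + 5) = ((5 * k + 5 : Nat) : Int) by push_cast; ring,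
    Int.toNat_natCast]
  congr 1
  omega

lemma foldl_pyRange_const {α : Type} (g : α → α) (m : Nat) (x : α) :
    (PySem.List.pyRange 0 (m : Int)).foldl (fun a _ => g a) x = g^[m] x := by
  induction m generalizing x with
  | zero => rw [PySem.List.pyRange_one_eq_nil (by omega)]; simp
  | succ m ih =>
    have : ((m + 1 : Nat) : Int) = (m : Int) + 1 := by push_cast; ring
    rw [this, PySem.List.pyRange_one_succ_right (by omega), List.foldl_append]
    simp only [List.foldl_cons, List.foldl_nil]
    rw [ih, ← Function.iterate_succ_apply' g m x]

lemma popStep_eq {α : Type} (l : List α) :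
    ((PySem.List.pop? l).map Prod.snd).getD l = l.dropLast := by
  cases l with
  | nil => simp [PySem.List.pop?, PySem.List.pyIdx?]
  | cons x t =>
    have hlen : 0 < (x :: t).length := by simp
    simp only [PySem.List.pop?, PySem.List.pyIdx?]
    have h1 : ¬ (0 : Int) ≤ -1 := by omega
    have h2 : -((x :: t).length : Int) ≤ -1 := by
      simp only [List.length_cons]; push_cast; omega
    simp only [if_neg h1, if_pos h2]
    have h3 : (((1 : Int)).toNat) = 1 := rfl
    have h4 : (x :: t).length - 1 < (x :: t).length := by omega
    rw [show ((-(-1 : Int)).toNat) = 1 from rfl]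
    simp only [Option.bind]
    rw [List.getElem?_eq_getElem h4]
    simp only [Option.bind_some, Option.map_some, Option.getD_some]
    exact List.eraseIdx_length_sub_one

lemma dropLast_iter {α : Type} (m : Nat) (l : List α) :
    (List.dropLast)^[m] l = l.take (l.length - m) := by
  induction m generalizing l with
  | zero => simp
  | succ m ih =>
    rw [Function.iterate_succ_apply, ih, List.length_dropLast, List.dropLast_eq_take,
      List.take_take]
    congr 1
    omega

-- A's pop loop is take
lemma popLoop_spec (m : Nat) (l : List (List String)) (hm : m ≤ l.length) :
    (PySem.List.pyRange 0 (m : Int)).foldl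
      (fun a _ => ((PySem.List.pop? a).map Prod.snd).getD a) l = l.take (l.length - m) := by
  have hg : (fun a : List (List String) => ((PySem.List.pop? a).map Prod.snd).getD a)
      = List.dropLast := funext popStep_eq
  exact (foldl_pyRange_const _ m l).trans (by rw [hg, dropLast_iter])

-- the leaf values A's dfs adds to 'answer' (before the accumulator t is added)
def leavesA : List Int → List (List String) → Int → List Int
  | _, [], _ => []
  | picks, g :: rest, pick =>
    if PySem.List.pyGetD picks pick 0 = 0 then []
    else
      let np := PySem.List.pySetD picks pick (PySem.List.pyGetD picks pick 0 - 1)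
      let c := if pick = 0 then (costTriple g).1
               else if pick = 1 then (costTriple g).2.1
               else if pick = 2 then (costTriple g).2.2 else 0
      if rest = [] then [c]
      else (leavesA np rest 0 ++ leavesA np rest 1 ++ leavesA np rest 2).map (fun v => c + v)

lemma update_nil (ans : PySem.Set Int) : PySem.Set.update ans [] = ans := rfl

lemma update_single (ans : PySem.Set Int) (x : Int) :
    PySem.Set.update ans [x] = PySem.Set.add ans x := rfl

lemma update_append (ans : PySem.Set Int) (l1 l2 : List Int) :
    PySem.Set.update ans (l1 ++ l2) = PySem.Set.update (PySem.Set.update ans l1) l2 :=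
  List.foldl_append

lemma fold0 (g : List String) (t : Int) :
    g.foldl (fun acc _ => acc + 1) t = t + (costTriple g).1 := by
  rw [PySem.List.foldl_add g (fun _ => 1) t]
  simp [costTriple]

lemma fold1 (g : List String) (t : Int) :
    g.foldl (fun acc m => if m == "diamond" then acc + 5 else acc + 1) t
      = t + (costTriple g).2.1 := by
  have hb : (fun (acc : Int) (m : String) => if m == "diamond" then acc + 5 else acc + 1)
      = fun acc m => acc + (if m == "diamond" then (5 : Int) else 1) := by
    funext acc m; split <;> rfl
  rw [hb, PySem.List.foldl_add]
  rfl

lemma fold2 (g : List String) (t : Int) :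
    g.foldl (fun acc m =>
      if m == "diamond" then acc + 25
      else if m == "iron" then acc + 5
      else if m == "stone" then acc + 1 else acc) t
      = t + (costTriple g).2.2 := by
  have hb : (fun (acc : Int) (m : String) =>
      if m == "diamond" then acc + 25
      else if m == "iron" then acc + 5
      else if m == "stone" then acc + 1 else acc)
      = fun acc m => acc + (if m == "diamond" then (25 : Int)
          else if m == "iron" then (5 : Int)
          else if m == "stone" then (1 : Int) else 0) := by
    funext acc m; split_ifs <;> ring
  rw [hb, PySem.List.foldl_add]
  rfl

lemma dfsA_spec (arr : List (List String)) : ∀ (picks : List Int) (pick t : Int)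
    (ans : PySem.Set Int),
    dfsA picks arr pick t ans = PySem.Set.update ans ((leavesA picks arr pick).map (fun v => t + v)) := by
  induction arr with
  | nil => intro picks pick t ans; simp [dfsA, leavesA, update_nil]
  | cons g rest ih =>
    intro picks pick t ans
    simp only [dfsA, leavesA]
    by_cases h : PySem.List.pyGetD picks pick 0 = 0
    · simp [h, update_nil]
    · have hb : (PySem.List.pyGetD picks pick 0 == 0) = false := by simp [h]
      rw [hb]
      simp only [Bool.false_eq_true, if_false, if_neg h]
      set np := PySem.List.pySetD picks pick (PySem.List.pyGetD picks pick 0 - 1) with hnp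
      set c : Int := if pick = 0 then (costTriple g).1
               else if pick = 1 then (costTriple g).2.1
               else if pick = 2 then (costTriple g).2.2 else 0 with hc
      have hfold : (if pick == 0 then g.foldl (fun acc _ => acc + 1) t
        else if pick == 1 then
          g.foldl (fun acc m => if m == "diamond" then acc + 5 else acc + 1) t
        else if pick == 2 then
          g.foldl (fun acc m =>
            if m == "diamond" then acc + 25
            else if m == "iron" then acc + 5
            else if m == "stone" then acc + 1 else acc) t
        else t) = t + c := by
        rw [hc]
        by_cases h0 : pick = 0
        · subst h0
          rw [if_pos (by decide), fold0, if_pos rfl]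
        · by_cases h1 : pick = 1
          · subst h1
            rw [if_neg (by decide), if_pos (by decide), fold1, if_neg (by decide), if_pos rfl]
          · by_cases h2 : pick = 2
            · subst h2
              rw [if_neg (by decide), if_neg (by decide), if_pos (by decide), fold2,
                if_neg (by decide), if_neg (by decide), if_pos rfl]
            · rw [if_neg (by simp [h0]), if_neg (by simp [h1]), if_neg (by simp [h2]),
                if_neg h0, if_neg h1, if_neg h2]
              ring
      rw [hfold]
      by_cases hr : rest = []
      · subst hr
        simp [update_single]
      · have hrb : (rest == ([] : List (List String))) = false := by
          simp [hr]
        rw [hrb]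
        simp only [Bool.false_eq_true, if_false, if_neg hr]
        rw [ih, ih, ih, ← update_append, ← update_append, ← List.map_append, ← List.map_append,
          List.map_map]
        congr 1
        simp only [List.append_assoc]
        apply List.map_congr_left
        intro v _
        simp [Function.comp]
        ring

def MinSpec (L : List Int) (m : Int) : Prop := m ∈ L ∧ ∀ y ∈ L, m ≤ y

lemma min?_eq_of_minSpec {L : List Int} {m : Int} (h : MinSpec L m) :
    PySem.List.min? L (fun x => x) = some m := by
  obtain ⟨hm, hle⟩ := h
  cases hmin : PySem.List.min? L (fun x => x) with
  | none =>
    rw [PySem.List.min?_eq_none_iff] at hmin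
    subst hmin; simp at hm
  | some m' =>
    have h1 := PySem.List.min?_mem hmin
    have h2 := PySem.List.min?_isMin hmin
    have : m' = m := le_antisymm (h2 m hm) (hle m' h1)
    rw [this]

lemma min?_append_id (X Y : List Int) :
    PySem.List.min? (X ++ Y) (fun x => x) =
      match PySem.List.min? X (fun x => x), PySem.List.min? Y (fun x => x) with
      | none, o => o
      | some u, none => some u
      | some u, some v => some (min u v) := by
  cases hX : PySem.List.min? X (fun x => x) with
  | none =>
    rw [PySem.List.min?_eq_none_iff] at hX
    subst hX; simp
  | some u =>
    cases hY : PySem.List.min? Y (fun x => x) with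
    | none =>
      rw [PySem.List.min?_eq_none_iff] at hY
      subst hY; simpa using hX
    | some v =>
      have hXm := PySem.List.min?_mem hX
      have hXl := PySem.List.min?_isMin hX
      have hYm := PySem.List.min?_mem hY
      have hYl := PySem.List.min?_isMin hY
      apply min?_eq_of_minSpec
      constructor
      · rcases le_total u v with h | h
        · rw [min_eq_left h]; exact List.mem_append.mpr (Or.inl hXm)
        · rw [min_eq_right h]; exact List.mem_append.mpr (Or.inr hYm)
      · intro y hy
        rcases List.mem_append.mp hy with h | h
        · exact le_trans (min_le_left u v) (hXl y h)
        · exact le_trans (min_le_right u v) (hYl y h)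

lemma min?_map_add (k : Int) (L : List Int) :
    PySem.List.min? (L.map (fun v => k + v)) (fun x => x) =
      (PySem.List.min? L (fun x => x)).map (fun v => k + v) := by
  cases hL : PySem.List.min? L (fun x => x) with
  | none =>
    rw [PySem.List.min?_eq_none_iff] at hL
    subst hL; simp
  | some m =>
    have hm := PySem.List.min?_mem hL
    have hl := PySem.List.min?_isMin hL
    simp only [Option.map_some]
    apply min?_eq_of_minSpec
    constructor
    · exact List.mem_map.mpr ⟨m, hm, rfl⟩
    · intro y hy
      obtain ⟨v, hv, rfl⟩ := List.mem_map.mp hy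
      have := hl v hv; omega

lemma min?_ofList (L : List Int) :
    PySem.List.min? (PySem.Set.ofList L) (fun x => x) = PySem.List.min? L (fun x => x) := by
  cases hL : PySem.List.min? L (fun x => x) with
  | none =>
    rw [PySem.List.min?_eq_none_iff] at hL
    subst hL
    rw [PySem.List.min?_eq_none_iff]
    rfl
  | some m =>
    have hm := PySem.List.min?_mem hL
    have hl := PySem.List.min?_isMin hL
    apply min?_eq_of_minSpec
    exact ⟨(PySem.Set.mem_ofList L m).mpr hm,
      fun y hy => hl y ((PySem.Set.mem_ofList L y).mp hy)⟩

lemma getD3_0 (a b c : Int) (ext : List Int) :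
    PySem.List.pyGetD (a :: b :: c :: ext) 0 0 = a := by
  simp only [PySem.List.pyGetD, PySem.List.pyGet?, PySem.List.pyIdx?]
  rw [if_pos (by norm_num), if_pos (by push_cast [List.length_cons]; omega)]
  rfl

lemma getD3_1 (a b c : Int) (ext : List Int) :
    PySem.List.pyGetD (a :: b :: c :: ext) 1 0 = b := by
  simp only [PySem.List.pyGetD, PySem.List.pyGet?, PySem.List.pyIdx?]
  rw [if_pos (by norm_num), if_pos (by push_cast [List.length_cons]; omega)]
  rfl

lemma getD3_2 (a b c : Int) (ext : List Int) :
    PySem.List.pyGetD (a :: b :: c :: ext) 2 0 = c := by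
  simp only [PySem.List.pyGetD, PySem.List.pyGet?, PySem.List.pyIdx?]
  rw [if_pos (by norm_num), if_pos (by push_cast [List.length_cons]; omega)]
  rfl

lemma setD3_0 (a b c v : Int) (ext : List Int) :
    PySem.List.pySetD (a :: b :: c :: ext) 0 v = v :: b :: c :: ext := by
  simp only [PySem.List.pySetD, PySem.List.pySet?, PySem.List.pyIdx?]
  rw [if_pos (by norm_num), if_pos (by push_cast [List.length_cons]; omega)]
  rfl

lemma setD3_1 (a b c v : Int) (ext : List Int) :
    PySem.List.pySetD (a :: b :: c :: ext) 1 v = a :: v :: c :: ext := by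
  simp only [PySem.List.pySetD, PySem.List.pySet?, PySem.List.pyIdx?]
  rw [if_pos (by norm_num), if_pos (by push_cast [List.length_cons]; omega)]
  rfl

lemma setD3_2 (a b c v : Int) (ext : List Int) :
    PySem.List.pySetD (a :: b :: c :: ext) 2 v = a :: b :: v :: ext := by
  simp only [PySem.List.pySetD, PySem.List.pySet?, PySem.List.pyIdx?]
  rw [if_pos (by norm_num), if_pos (by push_cast [List.length_cons]; omega)]
  rfl

lemma chunk5_length (xs : List String) :
    (chunk5 xs).length = (xs.length + 4) / 5 := by
  rw [← chunkIdx xs.length xs le_rfl]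
  simp

-- the heart: the minimum of all DFS leaves equals the DP value
lemma main_min (arr : List (List String)) :
    ∀ (a b c : Int) (ext : List Int), arr ≠ [] → 0 ≤ a → 0 ≤ b → 0 ≤ c →
    (arr.length : Int) ≤ a + b + c →
    PySem.List.min? (leavesA (a :: b :: c :: ext) arr 0 ++ leavesA (a :: b :: c :: ext) arr 1
        ++ leavesA (a :: b :: c :: ext) arr 2)
        (fun x => x) = some (bestB (arr.map costTriple) a b c) := by
  induction arr with
  | nil => intro a b c ext h; exact absurd rfl h
  | cons g rest ih =>
    intro a b c ext _ ha hb hc hfeas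
    have hlen1 : ((g :: rest).length : Int) = (rest.length : Int) + 1 := by
      simp
    have g0 := getD3_0 a b c ext
    have g1 := getD3_1 a b c ext
    have g2 := getD3_2 a b c ext
    have s0 := setD3_0 a b c (a - 1) ext
    have s1 := setD3_1 a b c (b - 1) ext
    have s2 := setD3_2 a b c (c - 1) ext
    have H0 : PySem.List.min? (leavesA (a :: b :: c :: ext) (g :: rest) 0) (fun x => x)
        = if a = 0 then none
          else some ((costTriple g).1 + bestB (rest.map costTriple) (a - 1) b c) := by
      by_cases h0 : a = 0
      · simp only [leavesA, g0, if_pos h0, if_pos rfl]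
        rfl
      · rw [if_neg h0]
        simp only [leavesA, g0, if_neg h0, s0]
        by_cases hr : rest = []
        · subst hr
          rw [if_pos rfl, PySem.List.min?_id_cons]
          simp [bestB]
        · rw [if_neg hr, min?_map_add,
            ih (a - 1) b c ext hr (by omega) hb hc (by rw [hlen1] at hfeas; omega)]
          rfl
    have H1 : PySem.List.min? (leavesA (a :: b :: c :: ext) (g :: rest) 1) (fun x => x)
        = if b = 0 then none
          else some ((costTriple g).2.1 + bestB (rest.map costTriple) a (b - 1) c) := by
      by_cases h0 : b = 0
      · simp only [leavesA, g1, if_pos h0]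
        rfl
      · rw [if_neg h0]
        simp only [leavesA, g1, if_neg h0, s1,
          show ((1 : Int) = 0) ↔ False from by norm_num, if_false, if_true]
        by_cases hr : rest = []
        · subst hr
          rw [if_pos rfl, PySem.List.min?_id_cons]
          simp [bestB]
        · rw [if_neg hr, min?_map_add,
            ih a (b - 1) c ext hr ha (by omega) hc (by rw [hlen1] at hfeas; omega)]
          rfl
    have H2 : PySem.List.min? (leavesA (a :: b :: c :: ext) (g :: rest) 2) (fun x => x)
        = if c = 0 then none
          else some ((costTriple g).2.2 + bestB (rest.map costTriple) a b (c - 1)) := by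
      by_cases h0 : c = 0
      · simp only [leavesA, g2, if_pos h0]
        rfl
      · rw [if_neg h0]
        simp only [leavesA, g2, if_neg h0, s2,
          show ((2 : Int) = 0) ↔ False from by norm_num,
          show ((2 : Int) = 1) ↔ False from by norm_num, if_false, if_true]
        by_cases hr : rest = []
        · subst hr
          rw [if_pos rfl, PySem.List.min?_id_cons]
          simp [bestB]
        · rw [if_neg hr, min?_map_add,
            ih a b (c - 1) ext hr ha hb (by omega) (by rw [hlen1] at hfeas; omega)]
          rfl
    have P : ∀ x : Int, ∀ p : Prop, ∀ _ : Decidable p,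
        PySem.List.min? (if p then [x] else []) (fun y => y) = if p then some x else none := by
      intro x p inst
      split
      · rw [PySem.List.min?_id_cons]; rfl
      · rfl
    rw [min?_append_id, min?_append_id, H0, H1, H2]
    simp only [List.map_cons, bestB]
    rw [min?_append_id, min?_append_id, P, P, P]
    by_cases hA : a = 0 <;> by_cases hB : b = 0 <;> by_cases hC : c = 0
    · exfalso; rw [hlen1] at hfeas; omega
    · rw [if_pos hA, if_pos hB, if_neg hC, if_neg (by omega : ¬ a > 0),
        if_neg (by omega : ¬ b > 0), if_pos (by omega : c > 0)]; rfl
    · rw [if_pos hA, if_neg hB, if_pos hC, if_neg (by omega : ¬ a > 0),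
        if_pos (by omega : b > 0), if_neg (by omega : ¬ c > 0)]; rfl
    · rw [if_pos hA, if_neg hB, if_neg hC, if_neg (by omega : ¬ a > 0),
        if_pos (by omega : b > 0), if_pos (by omega : c > 0)]; rfl
    · rw [if_neg hA, if_pos hB, if_pos hC, if_pos (by omega : a > 0),
        if_neg (by omega : ¬ b > 0), if_neg (by omega : ¬ c > 0)]; rfl
    · rw [if_neg hA, if_pos hB, if_neg hC, if_pos (by omega : a > 0),
        if_neg (by omega : ¬ b > 0), if_pos (by omega : c > 0)]; rfl
    · rw [if_neg hA, if_neg hB, if_pos hC, if_pos (by omega : a > 0),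
        if_pos (by omega : b > 0), if_neg (by omega : ¬ c > 0)]; rfl
    · rw [if_neg hA, if_neg hB, if_neg hC, if_pos (by omega : a > 0),
        if_pos (by omega : b > 0), if_pos (by omega : c > 0)]; rfl

lemma map_zero_add (L : List Int) : L.map (fun v => 0 + v) = L := by
  simp

-- ===== VERDICT (by name: the statement is the Claim_ definition above) =====
theorem solution_spec : Claim_equal_solution := by
  intro picks minerals _hdom hpre
  obtain ⟨hlen, hnn, hmne, hsum, hfm⟩ := hpre
  unfold Spec_solution
  rcases picks with _ | ⟨a, picks⟩; · simp at hlen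
  rcases picks with _ | ⟨b, picks⟩; · simp at hlen
  rcases picks with _ | ⟨c, ext⟩; · simp at hlen
  have ha : 0 ≤ a := hnn a (by simp)
  have hb : 0 ≤ b := hnn b (by simp)
  have hc : 0 ≤ c := hnn c (by simp)
  simp only [List.sum_cons] at hsum
  have ht3 : (List.take 3 (a :: b :: c :: ext)).sum = a + b + c := by
    simp; ring
  rw [ht3] at hfm
  simp only [List.sum_cons] at hfm
  have hch : chunk5 minerals ≠ [] := chunk5_ne_nil minerals hmne
  have hclen : ((chunk5 minerals).length : Int) = (((minerals.length + 4) / 5 : Nat) : Int) := by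
    rw [chunk5_length]
  have hgroupA := loopA_spec minerals minerals 0 [] [] (by simp) (by simp) (by simp)
    (fun _ => rfl)
  simp only [Nat.cast_zero, List.nil_append] at hgroupA
  simp only [solution, solution_alt]
  rw [hgroupA, groupsB_spec, getD3_0, getD3_1, getD3_2]
  simp only [List.sum_cons]
  set S : Int := a + (b + (c + ext.sum)) with hS
  by_cases ht : S < ((chunk5 minerals).length : Int)
  · rw [if_pos ht, if_pos ht]
    have hSpos : 0 < S := by omega
    have hm : ((chunk5 minerals).length : Int) - S
        = (((chunk5 minerals).length - S.toNat : Nat) : Int) := by omega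
    rw [hm, popLoop_spec ((chunk5 minerals).length - S.toNat) (chunk5 minerals) (by omega)]
    have htake : (chunk5 minerals).length - ((chunk5 minerals).length - S.toNat)
        = S.toNat := by omega
    rw [htake, PySem.List.slice_to (chunk5 minerals) (by omega)]
    set arrF := (chunk5 minerals).take S.toNat with harr
    have hne : arrF ≠ [] := by
      rw [harr, ne_eq, List.take_eq_nil_iff]
      rintro (h | h)
      · omega
      · exact hch h
    have hfeas : (arrF.length : Int) ≤ a + b + c := by
      rw [harr]
      have h1 : arrF.length = min S.toNat (chunk5 minerals).length := by
        rw [harr, List.length_take]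
      rw [harr] at h1
      omega
    rw [dfsA_spec, dfsA_spec, dfsA_spec, ← update_append, ← update_append,
      map_zero_add, map_zero_add, map_zero_add, ← List.append_assoc,
      show PySem.Set.update PySem.Set.empty
          (leavesA (a :: b :: c :: ext) arrF 0 ++ leavesA (a :: b :: c :: ext) arrF 1
            ++ leavesA (a :: b :: c :: ext) arrF 2)
        = PySem.Set.ofList
          (leavesA (a :: b :: c :: ext) arrF 0 ++ leavesA (a :: b :: c :: ext) arrF 1
            ++ leavesA (a :: b :: c :: ext) arrF 2)
        from (PySem.Set.ofList_eq_foldl _).symm,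
      min?_ofList, main_min arrF a b c ext hne ha hb hc hfeas]
    rfl
  · rw [if_neg ht, if_neg ht]
    set arrF := chunk5 minerals with harr
    have hfeas : (arrF.length : Int) ≤ a + b + c := by
      omega
    rw [dfsA_spec, dfsA_spec, dfsA_spec, ← update_append, ← update_append,
      map_zero_add, map_zero_add, map_zero_add, ← List.append_assoc,
      show PySem.Set.update PySem.Set.empty
          (leavesA (a :: b :: c :: ext) arrF 0 ++ leavesA (a :: b :: c :: ext) arrF 1
            ++ leavesA (a :: b :: c :: ext) arrF 2)
        = PySem.Set.ofList
          (leavesA (a :: b :: c :: ext) arrF 0 ++ leavesA (a :: b :: c :: ext) arrF 1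
            ++ leavesA (a :: b :: c :: ext) arrF 2)
        from (PySem.Set.ofList_eq_foldl _).symm,
      min?_ofList, main_min arrF a b c ext hch ha hb hc hfeas]
    rfl
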